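-- pv_equiv track=rewrite | github.com/monk-time/algorithms | shbr4/a_groups_and_rooms.py | max_groups
-- ===== SOURCE A (Python) =====
-- def max_groups(groups: list[int], rooms: list[int]) -> int:
--     groups.sort()
--     rooms.sort()
--     group_i, room_i = 0, 0
--     while group_i < len(groups):
--         while room_i < len(rooms) and groups[group_i] > rooms[room_i]:
--             room_i += 1
--         if room_i >= len(rooms):
--             break
--         room_i += 1
--         group_i += 1
--     return group_i
-- ===== SOURCE B (Python) =====
-- def max_groups(groups: list[int], rooms: list[int]) -> int:
--     groups.sort()
--     rooms.sort()
--
--     def fits(k: int) -> bool: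
--         # the k smallest groups fit pairwise into the k largest rooms
--         return all(g <= r for g, r in zip(groups[:k], rooms[len(rooms) - k:]))
--
--     lo, hi = 0, min(len(groups), len(rooms))
--     while lo < hi:
--         mid = (lo + hi + 1) // 2
--         if fits(mid):
--             lo = mid
--         else:
--             hi = mid - 1
--     return lo
-- ===== Notes on version B (the rewrite author's own statement) =====
-- stated objective: alternative
-- what changed: Replaces A's greedy two-pointer matching loop by a binary search on the answer k with the feasibility check 'the k smallest groups fit pairwise into the k largest rooms' (a decision-procedure + search instead of constructing the matching).
import Mathlib
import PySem

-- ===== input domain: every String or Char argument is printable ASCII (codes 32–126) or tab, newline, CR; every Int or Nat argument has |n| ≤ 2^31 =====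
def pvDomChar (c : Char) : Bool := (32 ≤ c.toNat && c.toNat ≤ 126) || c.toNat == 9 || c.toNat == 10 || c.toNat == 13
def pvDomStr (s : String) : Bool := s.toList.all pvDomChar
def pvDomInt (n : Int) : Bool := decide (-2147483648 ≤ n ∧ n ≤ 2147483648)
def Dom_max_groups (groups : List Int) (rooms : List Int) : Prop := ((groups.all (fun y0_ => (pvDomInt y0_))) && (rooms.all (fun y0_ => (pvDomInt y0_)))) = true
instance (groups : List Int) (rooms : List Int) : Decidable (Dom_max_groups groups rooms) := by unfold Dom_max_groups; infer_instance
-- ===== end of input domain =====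

-- B replaces A's greedy two-pointer matching by a binary search on the answer k with the
-- feasibility check "the k smallest groups fit pairwise into the k largest rooms"
-- (objective: alternative). Both A and B sort both argument lists in place; the
-- equivalence proved here is about the return value (the mutation is identical anyway).

-- ===== PORT A =====
-- inner 'while room_i < len(rooms) and groups[group_i] > rooms[room_i]: room_i += 1'
def maxGroupsSkip (g : Int) (rs : List Int) (ri : Nat) : Nat :=
  if h : ri < rs.length then
    if g > rs[ri] then maxGroupsSkip g rs (ri + 1) else ri
  else ri
termination_by rs.length - ri

-- outer 'while group_i < len(groups): …'
def maxGroupsLoop (gs rs : List Int) (gi ri : Nat) : Nat :=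
  if h : gi < gs.length then
    let ri' := maxGroupsSkip gs[gi] rs ri
    if ri' ≥ rs.length then gi
    else maxGroupsLoop gs rs (gi + 1) (ri' + 1)
  else gi
termination_by gs.length - gi

def max_groups (groups : List Int) (rooms : List Int) : Int :=
  let gs := PySem.List.sorted groups (fun x => x) false
  let rs := PySem.List.sorted rooms (fun x => x) false
  (maxGroupsLoop gs rs 0 0 : Int)

-- ===== PORT B =====
-- 'all(g <= r for g, r in zip(groups[:k], rooms[len(rooms) - k:]))'
def maxGroupsFits (gs rs : List Int) (k : Nat) : Bool :=
  ((gs.take k).zip (rs.drop (rs.length - k))).all (fun p => p.1 ≤ p.2)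

-- 'while lo < hi: mid = (lo + hi + 1) // 2; …'
def maxGroupsBsearch (gs rs : List Int) (lo hi : Nat) : Nat :=
  if lo < hi then
    let mid := (lo + hi + 1) / 2
    if maxGroupsFits gs rs mid then maxGroupsBsearch gs rs mid hi
    else maxGroupsBsearch gs rs lo (mid - 1)
  else lo
termination_by hi - lo
decreasing_by all_goals omega

def max_groups_alt (groups : List Int) (rooms : List Int) : Int :=
  let gs := PySem.List.sorted groups (fun x => x) false
  let rs := PySem.List.sorted rooms (fun x => x) false
  (Int.ofNat (maxGroupsBsearch gs rs 0 (min gs.length rs.length)))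

-- ===== PRECONDITION & SPEC =====
def Spec_max_groups (groups : List Int) (rooms : List Int) (out : Int) : Prop := out = max_groups_alt groups rooms
instance (groups : List Int) (rooms : List Int) (out : Int) : Decidable (Spec_max_groups groups rooms out) := by unfold Spec_max_groups; infer_instance

-- ===== CLAIM (what is proved, stated in full; the proofs are below) =====
def Claim_equal_max_groups : Prop := ∀ (groups : List Int) (rooms : List Int), Dom_max_groups groups rooms → Spec_max_groups groups rooms (max_groups groups rooms)

-- ===== LEMMAS AND PROOFS =====

-- The greedy matching count, structurally (proof-side characterisation of A's loop).
def gre : List Int → List Int → Nat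
  | [], _ => 0
  | _ :: _, [] => 0
  | g :: gs, r :: rs => if g ≤ r then gre gs rs + 1 else gre (g :: gs) rs
termination_by gs rs => gs.length + rs.length

-- Feasibility: the k smallest groups fit pairwise into the k largest rooms.
def fitsP (gs rs : List Int) (k : Nat) : Prop :=
  k ≤ gs.length ∧ k ≤ rs.length ∧ ∀ i, i < k → gs.getD i 0 ≤ rs.getD (rs.length - k + i) 0

lemma gre_nil_right : ∀ gs : List Int, gre gs [] = 0 := by
  intro gs; cases gs <;> simp [gre]

lemma loop_eq_gre (rsuf : List Int) (gs rs : List Int) (gi ri : Nat)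
    (hdrop : rs.drop ri = rsuf) :
    maxGroupsLoop gs rs gi ri = gi + gre (gs.drop gi) rsuf := by
  induction rsuf generalizing gi ri with
  | nil =>
    have hri : rs.length ≤ ri := List.drop_eq_nil_iff.mp hdrop
    rw [maxGroupsLoop, gre_nil_right]
    split
    · rw [maxGroupsSkip, dif_neg (by omega), if_pos (by omega)]; omega
    · omega
  | cons r t ih =>
    have hri : ri < rs.length := by
      by_contra h
      rw [List.drop_eq_nil_of_le (by omega)] at hdrop; simp at hdrop
    have hget : rs[ri] = r := by
      have := List.drop_eq_getElem_cons (l := rs) hri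
      rw [hdrop] at this
      exact (List.cons.injEq _ _ _ _ ▸ this).1.symm
    have hdrop' : rs.drop (ri + 1) = t := by
      have := List.drop_eq_getElem_cons (l := rs) hri
      rw [hdrop] at this
      exact ((List.cons.injEq _ _ _ _).mp this).2.symm
    by_cases hg : gi < gs.length
    · have hdg : gs.drop gi = gs[gi] :: gs.drop (gi + 1) := List.drop_eq_getElem_cons hg
      by_cases hfit : gs[gi] ≤ r
      · rw [maxGroupsLoop, dif_pos hg]
        have hskip : maxGroupsSkip gs[gi] rs ri = ri := by
          rw [maxGroupsSkip, dif_pos hri, if_neg (by rw [hget]; omega)]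
        simp only [hskip]
        rw [if_neg (by omega), ih (gi + 1) (ri + 1) hdrop', hdg, gre, if_pos hfit]
        omega
      · have hskip : maxGroupsLoop gs rs gi ri = maxGroupsLoop gs rs gi (ri + 1) := by
          rw [maxGroupsLoop, maxGroupsLoop, dif_pos hg, dif_pos hg]
          have : maxGroupsSkip gs[gi] rs ri = maxGroupsSkip gs[gi] rs (ri + 1) := by
            rw [maxGroupsSkip, dif_pos hri, if_pos (by rw [hget]; omega)]
          rw [this]
        rw [hskip, ih gi (ri + 1) hdrop', hdg, gre, if_neg hfit, ← hdg]
    · rw [maxGroupsLoop, dif_neg hg, List.drop_eq_nil_of_le (by omega)]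
      simp [gre]

-- Any feasible k is at most the greedy count (no sortedness needed).
lemma gre_ge : ∀ (rs gs : List Int) (k : Nat), fitsP gs rs k → k ≤ gre gs rs := by
  intro rs
  induction rs with
  | nil => intro gs k h; have := h.2.1; simp at this; omega
  | cons r rt ih =>
    intro gs k h
    obtain ⟨hkg, hkr, hw⟩ := h
    match k, gs with
    | 0, _ => omega
    | k' + 1, [] => simp at hkg
    | k' + 1, g :: gt =>
      simp only [List.length_cons] at hkg hkr
      by_cases hfit : g ≤ r
      · rw [gre, if_pos hfit]
        have : fitsP gt rt k' := by
          refine ⟨by omega, by omega, ?_⟩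
          intro i hi
          have := hw (i + 1) (by omega)
          have hidx : (r :: rt).length - (k' + 1) + (i + 1) = (rt.length - k' + i) + 1 := by
            simp only [List.length_cons]; omega
          rw [hidx] at this
          simpa using this
        have := ih gt k' this; omega
      · have hk'm : k' + 1 ≤ rt.length := by
          by_contra hc
          have h0 := hw 0 (by omega)
          rw [show (r :: rt).length - (k' + 1) + 0 = 0 by
            simp only [List.length_cons]; omega] at h0
          simp at h0
          exact hfit h0
        rw [gre, if_neg hfit]
        refine ih (g :: gt) (k' + 1) ⟨by simpa using hkg, hk'm, ?_⟩
        intro i hi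
        have := hw i hi
        have hidx : (r :: rt).length - (k' + 1) + i = (rt.length - (k' + 1) + i) + 1 := by
          simp only [List.length_cons]; omega
        rw [hidx] at this
        simpa using this

-- The greedy count is feasible (rooms sorted).
lemma gre_fits : ∀ (rs gs : List Int), rs.Pairwise (· ≤ ·) → fitsP gs rs (gre gs rs) := by
  intro rs
  induction rs with
  | nil =>
    intro gs _; rw [gre_nil_right]; exact ⟨Nat.zero_le _, Nat.zero_le _, by omega⟩
  | cons r rt ih =>
    intro gs hs
    have hsrt : rt.Pairwise (· ≤ ·) := (List.pairwise_cons.mp hs).2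
    have hrle : ∀ x ∈ rt, r ≤ x := (List.pairwise_cons.mp hs).1
    match gs with
    | [] =>
      have h0 : gre ([] : List Int) (r :: rt) = 0 := by simp [gre]
      rw [h0]
      exact ⟨Nat.zero_le _, Nat.zero_le _, by omega⟩
    | g :: gt =>
      by_cases hfit : g ≤ r
      · rw [gre, if_pos hfit]
        obtain ⟨h1, h2, hw⟩ := ih gt hsrt
        set k' := gre gt rt with hk'
        refine ⟨by simpa using Nat.succ_le_succ h1, by simpa using Nat.succ_le_succ h2, ?_⟩
        intro i hi
        match i with
        | 0 =>
          simp only [Nat.add_zero]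
          by_cases h0 : (r :: rt).length - (k' + 1) = 0
          · rw [h0]; simpa using hfit
          · have hl : k' + 1 ≤ rt.length := by
              simp only [List.length_cons] at h0; omega
            have hlt : rt.length - k' - 1 < rt.length := by omega
            have hidx : (r :: rt).length - (k' + 1) = (rt.length - k' - 1) + 1 := by
              simp only [List.length_cons]; omega
            rw [hidx]
            simp only [List.getD_cons_succ, List.getD_cons_zero]
            rw [List.getD_eq_getElem _ _ hlt]
            exact le_trans hfit (hrle _ (List.getElem_mem hlt))
        | i' + 1 =>
          have := hw i' (by omega)
          have hidx : (r :: rt).length - (k' + 1) + (i' + 1) = (rt.length - k' + i') + 1 := by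
            simp only [List.length_cons]; omega
          rw [hidx]
          simpa using this
      · rw [gre, if_neg hfit]
        obtain ⟨h1, h2, hw⟩ := ih (g :: gt) hsrt
        set k := gre (g :: gt) rt with hk
        refine ⟨h1, by simp only [List.length_cons]; omega, ?_⟩
        intro i hi
        have := hw i hi
        have hidx : (r :: rt).length - k + i = (rt.length - k + i) + 1 := by
          simp only [List.length_cons]; omega
        rw [hidx]
        simpa using this

-- Feasibility is downward monotone (rooms sorted).
lemma fits_mono (gs rs : List Int) (hs : rs.Pairwise (· ≤ ·)) (k j : Nat)
    (h : fitsP gs rs k) (hj : j ≤ k) : fitsP gs rs j := by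
  obtain ⟨h1, h2, hw⟩ := h
  refine ⟨by omega, by omega, ?_⟩
  intro i hi
  have hik := hw i (by omega)
  have hlt1 : rs.length - k + i < rs.length := by omega
  have hlt2 : rs.length - j + i < rs.length := by omega
  rw [List.getD_eq_getElem _ _ hlt1] at hik
  rw [List.getD_eq_getElem _ _ hlt2]
  refine le_trans hik ?_
  rcases Nat.lt_or_ge (rs.length - k + i) (rs.length - j + i) with hlt | hge
  · exact List.pairwise_iff_getElem.mp hs _ _ hlt1 hlt2 hlt
  · have : rs.length - k + i = rs.length - j + i := by omega
    simp [this]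

-- The Bool check agrees with fitsP for k within both lengths.
lemma fitsB_iff (gs rs : List Int) (k : Nat) (h1 : k ≤ gs.length) (h2 : k ≤ rs.length) :
    maxGroupsFits gs rs k = true ↔ fitsP gs rs k := by
  unfold maxGroupsFits fitsP
  rw [List.all_eq_true]
  constructor
  · intro hall
    refine ⟨h1, h2, ?_⟩
    intro i hi
    have hlen : ((gs.take k).zip (rs.drop (rs.length - k))).length = k := by
      simp; omega
    have hmem : ((gs.take k).zip (rs.drop (rs.length - k)))[i]'(by omega) ∈
        (gs.take k).zip (rs.drop (rs.length - k)) := List.getElem_mem _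
    have := hall _ hmem
    rw [List.getElem_zip] at this
    simp only [decide_eq_true_eq] at this
    rw [List.getElem_take, List.getElem_drop] at this
    rw [List.getD_eq_getElem _ _ (by omega : i < gs.length),
        List.getD_eq_getElem _ _ (by omega : rs.length - k + i < rs.length)]
    exact this
  · intro ⟨_, _, hw⟩ p hp
    obtain ⟨i, hi, hip⟩ := List.getElem_of_mem hp
    have hlen : ((gs.take k).zip (rs.drop (rs.length - k))).length = k := by
      simp; omega
    rw [List.getElem_zip] at hip
    rw [← hip]
    simp only [decide_eq_true_eq]
    rw [List.getElem_take, List.getElem_drop]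
    have := hw i (by omega)
    rw [List.getD_eq_getElem _ _ (by omega : i < gs.length),
        List.getD_eq_getElem _ _ (by omega : rs.length - k + i < rs.length)] at this
    exact this

-- Binary search homes in on the greedy count.
lemma bsearch_eq_gre (gs rs : List Int) (hs : rs.Pairwise (· ≤ ·)) :
    ∀ lo hi, lo ≤ gre gs rs → gre gs rs ≤ hi → hi ≤ min gs.length rs.length →
      maxGroupsBsearch gs rs lo hi = gre gs rs := by
  intro lo hi
  induction hn : hi - lo using Nat.strong_induction_on generalizing lo hi with
  | _ n ih =>
    intro hlo hhi hmin
    rw [maxGroupsBsearch]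
    by_cases hlt : lo < hi
    · rw [if_pos hlt]
      have hmid1 : lo < (lo + hi + 1) / 2 := by omega
      have hmid2 : (lo + hi + 1) / 2 ≤ hi := by omega
      by_cases hf : maxGroupsFits gs rs ((lo + hi + 1) / 2) = true
      · simp only [hf, if_true]
        have hfp : fitsP gs rs ((lo + hi + 1) / 2) :=
          (fitsB_iff gs rs _ (by omega) (by omega)).mp hf
        have hge := gre_ge rs gs _ hfp
        exact ih (hi - (lo + hi + 1) / 2) (by omega) _ _ rfl hge hhi hmin
      · simp only [hf]
        have hgr : gre gs rs < (lo + hi + 1) / 2 := by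
          by_contra hc
          exact hf ((fitsB_iff gs rs _ (by omega) (by omega)).mpr
            (fits_mono gs rs hs _ _ (gre_fits rs gs hs) (by omega)))
        exact ih ((lo + hi + 1) / 2 - 1 - lo) (by omega) _ _ rfl hlo (by omega) (by omega)
    · rw [if_neg hlt]; omega

-- ===== VERDICT (by name: the statement is the Claim_ definition above) =====
-- Putting it together for the sorted lists.
lemma main_eq (gs rs : List Int) (hs : rs.Pairwise (· ≤ ·)) :
    ((maxGroupsLoop gs rs 0 0 : Nat) : Int) =
      Int.ofNat (maxGroupsBsearch gs rs 0 (min gs.length rs.length)) := by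
  have hfeas := gre_fits rs gs hs
  rw [loop_eq_gre rs gs rs 0 0 (by simp)]
  rw [bsearch_eq_gre gs rs hs 0 (min gs.length rs.length) (Nat.zero_le _)
    (by have := hfeas.1; have := hfeas.2.1; omega) (le_refl _)]
  simp

theorem max_groups_spec : Claim_equal_max_groups := by
  intro groups rooms _
  unfold Spec_max_groups max_groups max_groups_alt
  refine main_eq _ _ ?_
  have := PySem.List.sorted_pairwise (xs := rooms) (key := fun x : Int => x)
  simpa using this
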